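-- pv_equiv track=rewrite | github.com/ngoonee/songprez | songprez/control/spsong.py | _split_lyric_line
-- ===== SOURCE A (Python) =====
-- def _split_lyric_line(lyricLine, chordLine):
--     '''
--     Take two matching lyric/chord lines and split up the lyric line
--     according to the spacing of the list in chordLine. Returns the
--     lyric line as a properly spaced list which matches the spacings
--     in chordLine
--     '''
--     # Check if previous line (lines are currently reversed so
--     # that would be the line under this chord line) is a lyric
--     # line. It must not be zero length, must have a space
--     # space as first character and not have | as second character
--     prevLineIsLyric = (len(lyricLine) > 0 and lyricLine[0] == ' ' and
--                        lyricLine[1] != '|')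
--     if prevLineIsLyric:
--         splitLyric = []
--         index = 1
--         for item in chordLine:
--             if item != '':
--                 splitLyric.append(lyricLine
--                                   [index:index+len(item)])
--             else:
--                 splitLyric.append(lyricLine[index:])
--             index += len(item)
--         while splitLyric[-1] == '':
--             splitLyric.pop()
--     else:
--         splitLyric = None
--     # At this point, splitLyric is either None (no matching lyric
--     # line) or contains a list of lyrical elements exactly
--     # corresponding to the list in chordLine
--     return splitLyric
-- ===== SOURCE B (Python) =====
-- def _split_lyric_line(lyricLine, chordLine):
--     if not (len(lyricLine) > 0 and lyricLine[0] == ' ' and lyricLine[1] != '|'):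
--         return None
--     # prefix-sum table of slice start offsets
--     starts = [1]
--     for item in chordLine:
--         starts.append(starts[-1] + len(item))
--     # build the result back-to-front, skipping trailing empty pieces
--     result = []
--     for item, start in zip(reversed(chordLine), reversed(starts[:-1])):
--         piece = lyricLine[start:start + len(item)] if item else lyricLine[start:]
--         if result or piece:
--             result.append(piece)
--     result.reverse()
--     return result
-- ===== Notes on version B (the rewrite author's own statement) =====
-- stated objective: alternative
-- what changed: B precomputes a prefix-sum table of slice start offsets and then builds the result back-to-front in a single reverse pass that skips trailing empty pieces, instead of A's forward append loop followed by a pop-while strip of trailing empties.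
import Mathlib
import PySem

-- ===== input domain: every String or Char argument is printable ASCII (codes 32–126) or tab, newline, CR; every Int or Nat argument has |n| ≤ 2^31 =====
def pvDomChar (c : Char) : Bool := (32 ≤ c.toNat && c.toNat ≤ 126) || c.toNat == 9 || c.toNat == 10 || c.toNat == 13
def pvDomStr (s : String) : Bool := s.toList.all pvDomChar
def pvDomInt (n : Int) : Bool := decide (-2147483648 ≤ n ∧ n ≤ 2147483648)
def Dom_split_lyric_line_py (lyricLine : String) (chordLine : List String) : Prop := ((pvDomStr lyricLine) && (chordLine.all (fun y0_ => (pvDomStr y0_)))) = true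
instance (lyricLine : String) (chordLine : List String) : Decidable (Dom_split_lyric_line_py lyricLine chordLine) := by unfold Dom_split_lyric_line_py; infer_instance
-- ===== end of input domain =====

-- B builds the split via a prefix-sum offset table and a single back-to-front pass that skips
-- trailing empty pieces, instead of A's forward append loop followed by a pop-while strip
-- (objective: alternative decomposition, same cost).

-- ===== PORT A =====
-- the for-loop: splitLyric starts as acc, index walks forward, one append per item
def pvLoopA (l : List Char) (items : List String) (index : Nat) (acc : List (List Char)) : List (List Char) :=
  match items with
  | [] => acc
  | item :: rest =>
      let it := item.toList
      let acc' :=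
        if it ≠ [] then
          acc ++ [PySem.List.slice l (some (index : Int)) (some ((index : Int) + (it.length : Int)))]
        else
          acc ++ [PySem.List.slice l (some (index : Int)) none]
      pvLoopA l rest (index + it.length) acc'

-- 'while splitLyric[-1] == "": splitLyric.pop()' (on [] Python raises IndexError; outside Pre_)
def pvPopStrip (acc : List (List Char)) : List (List Char) :=
  if h : acc = [] then acc
  else if acc.getLast h = [] then pvPopStrip acc.dropLast else acc
termination_by acc.length
decreasing_by
  have := List.length_pos_iff.mpr h
  simp [List.length_dropLast]
  omega

def split_lyric_line_py (lyricLine : String) (chordLine : List String) : Option (List String) :=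
  let l := lyricLine.toList
  -- lyricLine[1] on a length-1 string raises IndexError in Python (pyGet? = none there; outside Pre_)
  let prevLineIsLyric :=
    decide (0 < l.length) && (PySem.List.pyGet? l 0 == some ' ') && !(PySem.List.pyGet? l 1 == some '|')
  if prevLineIsLyric then
    some ((pvPopStrip (pvLoopA l chordLine 1 [])).map String.ofList)
  else
    none

-- ===== PORT B =====
def split_lyric_line_py_alt (lyricLine : String) (chordLine : List String) : Option (List String) :=
  let l := lyricLine.toList
  let prevLineIsLyric :=
    decide (0 < l.length) && (PySem.List.pyGet? l 0 == some ' ') && !(PySem.List.pyGet? l 1 == some '|')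
  if prevLineIsLyric then
    -- prefix-sum table of slice start offsets: starts.append(starts[-1] + len(item))
    let starts := chordLine.foldl (fun st item => st ++ [(PySem.List.pyGetD st (-1) 0) + item.toList.length]) [1]
    -- back-to-front pass over zip(reversed(chordLine), reversed(starts[:-1]))
    let rev := (chordLine.reverse.zip ((PySem.List.slice starts none (some (-1))).reverse)).foldl
      (fun res (p : String × Nat) =>
        let piece :=
          if p.1.toList ≠ [] then
            PySem.List.slice l (some (p.2 : Int)) (some ((p.2 : Int) + (p.1.toList.length : Int)))
          else
            PySem.List.slice l (some (p.2 : Int)) none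
        if res ≠ [] ∨ piece ≠ [] then res ++ [piece] else res) []
    some (rev.reverse.map String.ofList)
  else
    none

-- ===== PRECONDITION & SPEC =====
-- Pre_ excludes exactly the inputs where A raises IndexError: a length-1 lyricLine starting with ' '
-- (lyricLine[1] is evaluated), and a lyric-type lyricLine with an empty chordLine (splitLyric[-1] on []).
def Pre_split_lyric_line_py (lyricLine : String) (chordLine : List String) : Prop :=
  ¬ (lyricLine.toList.length = 1 ∧ lyricLine.toList[0]? = some ' ') ∧
  ((2 ≤ lyricLine.toList.length ∧ lyricLine.toList[0]? = some ' ' ∧ lyricLine.toList[1]? ≠ some '|') → chordLine ≠ [])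
instance (lyricLine : String) (chordLine : List String) : Decidable (Pre_split_lyric_line_py lyricLine chordLine) := by unfold Pre_split_lyric_line_py; infer_instance

def pvWitness_split_lyric_line_py : String × List String := (" hey ho", ["C", "", "Dm"])

def Spec_split_lyric_line_py (lyricLine : String) (chordLine : List String) (out : Option (List String)) : Prop := out = split_lyric_line_py_alt lyricLine chordLine
instance (lyricLine : String) (chordLine : List String) (out : Option (List String)) : Decidable (Spec_split_lyric_line_py lyricLine chordLine out) := by unfold Spec_split_lyric_line_py; infer_instance

-- ===== CLAIM (what is proved, stated in full; the proofs are below) =====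
def Claim_equal_split_lyric_line_py : Prop := ∀ (lyricLine : String) (chordLine : List String), Dom_split_lyric_line_py lyricLine chordLine → Pre_split_lyric_line_py lyricLine chordLine → Spec_split_lyric_line_py lyricLine chordLine (split_lyric_line_py lyricLine chordLine)
-- ===== LEMMAS AND PROOFS =====
-- one slice of the lyric line (the value both programs append for an item)
def pvPiece (l : List Char) (it : List Char) (start : Nat) : List Char :=
  if it ≠ [] then
    PySem.List.slice l (some (start : Int)) (some ((start : Int) + (it.length : Int)))
  else
    PySem.List.slice l (some (start : Int)) none

-- the forward list of pieces, the common yardstick of both proofs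
def pvPieces (l : List Char) (items : List String) (start : Nat) : List (List Char) :=
  match items with
  | [] => []
  | item :: rest => pvPiece l item.toList start :: pvPieces l rest (start + item.toList.length)

-- the forward list of start offsets
def pvOffsets (items : List String) (start : Nat) : List Nat :=
  match items with
  | [] => []
  | item :: rest => start :: pvOffsets rest (start + item.toList.length)

theorem pvLoopA_eq (l : List Char) (items : List String) :
    ∀ (index : Nat) (acc : List (List Char)),
      pvLoopA l items index acc = acc ++ pvPieces l items index := by
  induction items with
  | nil => intro index acc; simp [pvLoopA, pvPieces]
  | cons item rest ih =>
      intro index acc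
      simp only [pvLoopA, pvPieces, ih]
      by_cases h : item.toList = [] <;> simp [h, pvPiece]

theorem pvPopStrip_append (xs : List (List Char)) (y : List Char) :
    pvPopStrip (xs ++ [y]) = if y = [] then pvPopStrip xs else xs ++ [y] := by
  rw [pvPopStrip]
  simp

theorem pvPopStrip_eq_dropWhile (xs : List (List Char)) :
    pvPopStrip xs = (xs.reverse.dropWhile (· = [])).reverse := by
  induction xs using List.reverseRecOn with
  | nil => simp [pvPopStrip]
  | append_singleton xs y ih =>
      rw [pvPopStrip_append]
      by_cases h : y = [] <;> simp [h, ih]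

theorem pvStarts_eq (items : List String) :
    ∀ (acc : List Nat) (v : Nat),
      items.foldl (fun st item => st ++ [(PySem.List.pyGetD st (-1) 0) + item.toList.length]) (acc ++ [v])
        = acc ++ pvOffsets items v ++ [v + (items.map (fun it => it.toList.length)).sum] := by
  induction items with
  | nil => intro acc v; simp [pvOffsets]
  | cons item rest ih =>
      intro acc v
      simp only [List.foldl_cons, PySem.List.pyGetD_neg_one_append_singleton]
      have := ih (acc ++ [v]) (v + item.toList.length)
      simp only [List.append_assoc, List.singleton_append] at this ⊢
      rw [this]
      simp [pvOffsets, Nat.add_assoc]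

theorem pvZip_pieces (l : List Char) (items : List String) :
    ∀ (v : Nat),
      ((items.zip (pvOffsets items v)).map
        (fun p : String × Nat => pvPiece l p.1.toList p.2)) = pvPieces l items v := by
  induction items with
  | nil => intro v; simp [pvOffsets, pvPieces]
  | cons item rest ih =>
      intro v
      simp only [pvOffsets, pvPieces, List.zip_cons_cons, List.map_cons]
      exact congrArg _ (ih _)

theorem pvFold_ne_nil (acc : List (List Char)) (ps : List (List Char)) (h : acc ≠ []) :
    ps.foldl (fun res piece => if res ≠ [] ∨ piece ≠ [] then res ++ [piece] else res) acc
      = acc ++ ps := by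
  induction ps generalizing acc with
  | nil => simp
  | cons p rest ih =>
      simp only [List.foldl_cons, if_pos (Or.inl h)]
      rw [ih (acc ++ [p]) (by simp)]
      simp

theorem pvFold_nil (ps : List (List Char)) :
    ps.foldl (fun res piece => if res ≠ [] ∨ piece ≠ [] then res ++ [piece] else res) []
      = ps.dropWhile (· = []) := by
  induction ps with
  | nil => simp
  | cons p rest ih =>
      by_cases h : p = []
      · simp [List.foldl_cons, h, ih]
      · simp only [List.foldl_cons, if_pos (Or.inr h)]
        simp only [List.nil_append]
        rw [pvFold_ne_nil [p] rest (by simp), List.dropWhile_cons]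
        simp [h]

theorem pvLength_offsets (items : List String) (v : Nat) :
    (pvOffsets items v).length = items.length := by
  induction items generalizing v with
  | nil => simp [pvOffsets]
  | cons item rest ih => simp [pvOffsets, ih]

theorem pvFoldB (l : List Char) (qs : List (String × Nat)) :
    (qs.foldl
      (fun res (p : String × Nat) =>
        let piece :=
          if p.1.toList ≠ [] then
            PySem.List.slice l (some (p.2 : Int)) (some ((p.2 : Int) + (p.1.toList.length : Int)))
          else
            PySem.List.slice l (some (p.2 : Int)) none
        if res ≠ [] ∨ piece ≠ [] then res ++ [piece] else res) [])
      = ((qs.map (fun p : String × Nat => pvPiece l p.1.toList p.2)).dropWhile (· = [])) := by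
  rw [← pvFold_nil, List.foldl_map]
  rfl

-- ===== VERDICT (by name: the statement is the Claim_ definition above) =====
theorem split_lyric_line_py_spec : Claim_equal_split_lyric_line_py := by
  intro lyricLine chordLine _ _
  unfold Spec_split_lyric_line_py
  simp only [split_lyric_line_py, split_lyric_line_py_alt]
  by_cases hguard :
      (decide (0 < lyricLine.toList.length) &&
        (PySem.List.pyGet? lyricLine.toList 0 == some ' ') &&
        !(PySem.List.pyGet? lyricLine.toList 1 == some '|')) = true
  · rw [if_pos hguard, if_pos hguard]
    have hA : pvLoopA lyricLine.toList chordLine 1 [] = pvPieces lyricLine.toList chordLine 1 := by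
      simpa using pvLoopA_eq lyricLine.toList chordLine 1 []
    have hst := pvStarts_eq chordLine ([] : List Nat) 1
    simp only [List.nil_append] at hst
    rw [hA, pvPopStrip_eq_dropWhile, hst, PySem.List.slice_to_neg_one, List.dropLast_concat]
    have hlen : chordLine.length = (pvOffsets chordLine 1).length :=
      (pvLength_offsets chordLine 1).symm
    have hzip : chordLine.reverse.zip (pvOffsets chordLine 1).reverse
        = (chordLine.zip (pvOffsets chordLine 1)).reverse := by
      simpa [List.zip] using (List.reverse_zipWith (f := Prod.mk) hlen).symm
    rw [hzip, pvFoldB]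
    simp only [List.map_reverse, pvZip_pieces]
  · rw [if_neg hguard, if_neg hguard]
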